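-- pv_equiv track=rewrite | github.com/umutcbarlak/pg1926 | python2 yapıldı.py | WebsiteValidation
-- ===== SOURCE A (Python) =====
-- website_rule = 'abcdefghijklmnopqrstuvwxyzABCDEFGHIJKLMNOPQRSTUVWXYZ1234567890'
--
-- def WebsiteValidation(website):
--     errors = 0
--     letters = list(website)
--     for i in range(0, len(website)):
--         check = website_rule.find(letters[i])
--         if(check == -1):
--             errors += 1
--     return errors
-- ===== SOURCE B (Python) =====
-- website_rule = 'abcdefghijklmnopqrstuvwxyzABCDEFGHIJKLMNOPQRSTUVWXYZ1234567890'
--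
-- def WebsiteValidation(website):
--     # build a frequency table of the website once, then sum the occurrence
--     # counts of the 62 allowed characters and subtract from the length
--     freq = {}
--     for ch in website:
--         freq[ch] = freq.get(ch, 0) + 1
--     ok = sum(freq.get(ch, 0) for ch in website_rule)
--     return len(website) - ok
-- ===== Notes on version B (the rewrite author's own statement) =====
-- stated objective: alternative
-- what changed: Instead of scanning the 62-char alphabet for every character of the website, B builds a frequency dictionary of the website in one pass, sums the counts of the allowed characters over the alphabet, and returns length minus that sum (complement counting with an inverted traversal; one O(1) dict update per character replaces a 62-char scan).
import Mathlib
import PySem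

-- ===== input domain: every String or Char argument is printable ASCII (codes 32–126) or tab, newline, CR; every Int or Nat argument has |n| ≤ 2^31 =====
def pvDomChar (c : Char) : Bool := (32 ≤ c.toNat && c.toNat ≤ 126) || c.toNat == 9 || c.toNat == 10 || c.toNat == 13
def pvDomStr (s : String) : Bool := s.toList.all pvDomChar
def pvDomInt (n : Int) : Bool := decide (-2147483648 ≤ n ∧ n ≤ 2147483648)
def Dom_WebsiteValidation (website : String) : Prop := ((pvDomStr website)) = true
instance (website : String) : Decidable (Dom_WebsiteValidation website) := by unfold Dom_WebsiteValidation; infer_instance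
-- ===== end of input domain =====

-- B builds a frequency dictionary of the website once and sums the counts of the
-- allowed characters, returning length minus that sum (inverted traversal).

-- ===== PORT A =====
def website_rule : List Char :=
  "abcdefghijklmnopqrstuvwxyzABCDEFGHIJKLMNOPQRSTUVWXYZ1234567890".toList

def WebsiteValidation (website : String) : Int :=
  let letters := website.toList
  (PySem.List.pyRange 0 (PySem.List.len letters) 1).foldl
    (fun errors i =>
      let check := PySem.Chars.find website_rule [PySem.List.pyGetD letters i ' ']
      if check = -1 then errors + 1 else errors) 0

-- ===== PORT B =====
def WebsiteValidation_alt (website : String) : Int :=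
  let freq : PySem.Dict Char Int :=
    website.toList.foldl (fun d ch => d.insert ch (d.getD ch 0 + 1)) PySem.Dict.empty
  let ok : Int := (website_rule.map (fun ch => freq.getD ch 0)).sum
  (website.toList.length : Int) - ok

-- ===== PRECONDITION & SPEC =====
def Spec_WebsiteValidation (website : String) (out : Int) : Prop := out = WebsiteValidation_alt website
instance (website : String) (out : Int) : Decidable (Spec_WebsiteValidation website out) := by unfold Spec_WebsiteValidation; infer_instance

-- ===== CLAIM (what is proved, stated in full; the proofs are below) =====
def Claim_equal_WebsiteValidation : Prop := ∀ (website : String), Dom_WebsiteValidation website → Spec_WebsiteValidation website (WebsiteValidation website)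

-- ===== LEMMAS AND PROOFS =====

-- A's result is the count of characters whose alphabet search fails
lemma foldl_as_countP (website : String) :
    WebsiteValidation website =
      (website.toList.countP (fun c => decide (PySem.Chars.find website_rule [c] = -1)) : Int) := by
  unfold WebsiteValidation
  rw [PySem.List.foldl_pyRange_pyGetD website.toList ' '
      (fun errors c => if PySem.Chars.find website_rule [c] = -1 then errors + 1 else errors) 0 (by norm_num)]
  simp [PySem.List.foldl_ite_add_one (fun c => PySem.Chars.find website_rule [c] = -1)]

-- on every domain character, 'find = -1' is exactly non-membership in the alphabet
lemma char_table : ∀ n ∈ List.range 127,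
    (!(pvDomChar (Char.ofNat n)) ||
      ((PySem.Chars.find website_rule [Char.ofNat n] == -1) == !(website_rule.contains (Char.ofNat n)))) = true := by
  set_option maxRecDepth 4096 in decide

lemma char_agree (c : Char) (h : pvDomChar c = true) :
    (PySem.Chars.find website_rule [c] = -1) ↔ ¬ (c ∈ website_rule) := by
  have hlt : c.toNat ∈ List.range 127 := by
    simp only [List.mem_range]
    simp only [pvDomChar, Bool.or_eq_true, Bool.and_eq_true, decide_eq_true_eq, beq_iff_eq] at h
    omega
  have ht := char_table c.toNat hlt
  rw [Char.ofNat_toNat, h] at ht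
  simp only [Bool.not_true, Bool.false_or, beq_iff_eq] at ht
  constructor
  · intro hf
    have h2 : (true == !website_rule.contains c) = true := by rw [← ht]; simp [hf]
    simp only [beq_iff_eq] at h2
    intro hm
    have := (List.contains_iff_mem).mpr hm
    rw [this] at h2; simp at h2
  · intro hm
    have hc : website_rule.contains c = false := by
      cases hb : website_rule.contains c
      · rfl
      · exact absurd ((List.contains_iff_mem).mp hb) hm
    rw [hc] at ht
    simpa using ht

-- countP of a disjunction of disjoint predicates splits into a sum
lemma countP_or_disjoint (xs : List Char) (p q : Char → Bool)
    (hd : ∀ x, ¬ (p x = true ∧ q x = true)) :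
    xs.countP (fun x => p x || q x) = xs.countP p + xs.countP q := by
  induction xs with
  | nil => simp
  | cons y ys ih =>
    by_cases hp : p y = true
    · have hq : q y = false := by
        cases hb : q y
        · rfl
        · exact absurd ⟨hp, hb⟩ (hd y)
      simp [hp, hq, ih]; omega
    · have hp' : p y = false := by cases hb : p y <;> simp_all
      cases hb : q y <;> simp [hp', hb, ih] <;> omega

-- summing the multiset counts of a duplicate-free list of keys counts membership
lemma sum_counts_eq_countP (xs : List Char) :
    ∀ rule : List Char, rule.Nodup →
      (rule.map (fun r => ((xs.count r : Int)))).sum =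
        (xs.countP (fun c => rule.contains c) : Int) := by
  intro rule
  induction rule with
  | nil => intro _; simp [List.countP_eq_zero.mpr]
  | cons r rs ih =>
    intro hnd
    have hnd' := hnd.of_cons
    have hr : r ∉ rs := (List.nodup_cons.mp hnd).1
    have hsplit : xs.countP (fun c => (r :: rs).contains c) =
        xs.countP (fun c => c == r) + xs.countP (fun c => rs.contains c) := by
      have := countP_or_disjoint xs (fun c => c == r) (fun c => rs.contains c)
        (by intro x ⟨h1, h2⟩
            have : x = r := by simpa using h1
            subst this
            exact hr (List.contains_iff_mem.mp h2))
      rw [← this]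
      apply List.countP_congr
      intro c _
      simp
    simp only [List.map_cons, List.sum_cons, ih hnd', hsplit]
    have : xs.count r = xs.countP (fun c => c == r) := by
      simp [List.count_eq_countP]
    rw [this]
    push_cast
    ring

-- ===== VERDICT (by name: the statement is the Claim_ definition above) =====
theorem WebsiteValidation_spec : Claim_equal_WebsiteValidation := by
  intro website hdom
  unfold Spec_WebsiteValidation WebsiteValidation_alt
  rw [foldl_as_countP]
  -- the dictionary lookup after the counting fold is the multiset count
  have hfreq : ∀ r : Char,
      ((website.toList.foldl (fun d ch => d.insert ch (d.getD ch 0 + 1))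
        (PySem.Dict.empty : PySem.Dict Char Int)).getD r 0) = (website.toList.count r : Int) := by
    intro r
    rw [PySem.Dict.getD_foldl_insert_add_one]
    simp [PySem.Dict.empty, PySem.Dict.getD, PySem.Dict.get?]
  simp only [hfreq]
  have hnodup : website_rule.Nodup := by decide
  rw [sum_counts_eq_countP website.toList website_rule hnodup]
  have hcong : website.toList.countP (fun c => decide (PySem.Chars.find website_rule [c] = -1)) =
      website.toList.countP (fun c => ! website_rule.contains c) := by
    apply List.countP_congr
    intro c hc
    have hd : pvDomChar c = true := by
      unfold Dom_WebsiteValidation pvDomStr at hdom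
      exact List.all_eq_true.mp hdom c hc
    simp only [decide_eq_true_eq, Bool.not_eq_true']
    rw [char_agree c hd]
    constructor
    · intro hm
      cases hb : website_rule.contains c
      · rfl
      · exact absurd (List.contains_iff_mem.mp hb) hm
    · intro hb hm
      rw [List.contains_iff_mem.mpr hm] at hb; cases hb
  rw [hcong]
  have hlen := List.length_eq_countP_add_countP (fun c => website_rule.contains c) (l := website.toList)
  have : website.toList.countP (fun c => ! website_rule.contains c) =
      website.toList.countP (fun c => ¬ website_rule.contains c = true) := by
    apply List.countP_congr; intro c _; simp
  rw [this]
  omega
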